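-- pv_equiv track=rewrite | github.com/CatSharkShin/Sorter | py with config files/sorter.py | recursiveincrement
-- ===== SOURCE A (Python) =====
-- def recursiveincrement(filename,index):
--     if index >= 0 and filename[index].isdigit():
--         if int(filename[index]) == 9:
--             if index == 0 or not filename[index-1].isdigit():
--                 filename[index] = 10
--             else:
--                 filename[index] = 0
--             return recursiveincrement(filename,index-1)
--         else:
--             filename[index] = int(filename[index])+1
--             return "".join(map(str,filename))
--     else:
--         return "".join(map(str,filename))
-- ===== SOURCE B (Python) =====
-- def recursiveincrement(filename, index):
--     # Pure scan-and-rebuild: find the run of 9-valued cells ending at index,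
--     # then build the result from slices (no in-place mutation, no recursion).
--     if index < 0 or not filename[index].isdigit():
--         return "".join(map(str, filename))
--     k = index
--     while k >= 0 and filename[k].isdigit() and int(filename[k]) == 9:
--         k -= 1
--     r = k + 1  # run of nines is positions r..index (possibly empty when r > index)
--     if r > index:
--         parts = filename[:index] + [str(int(filename[index]) + 1)] + filename[index+1:]
--     elif k >= 0 and filename[k].isdigit():
--         parts = filename[:k] + [str(int(filename[k]) + 1)] + ["0"] * (index - r + 1) + filename[index+1:]
--     else:
--         parts = filename[:r] + ["10"] + ["0"] * (index - r) + filename[index+1:]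
--     return "".join(parts)
-- ===== Notes on version B (the rewrite author's own statement) =====
-- stated objective: alternative
-- what changed: A's tail recursion with in-place cell mutation is replaced by a pure two-phase algorithm: one leftward scan locates the run of 9-valued cells ending at index, then the result is assembled once from list slices, an incremented cell, and a block of zeros, without mutating the input.
import Mathlib
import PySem

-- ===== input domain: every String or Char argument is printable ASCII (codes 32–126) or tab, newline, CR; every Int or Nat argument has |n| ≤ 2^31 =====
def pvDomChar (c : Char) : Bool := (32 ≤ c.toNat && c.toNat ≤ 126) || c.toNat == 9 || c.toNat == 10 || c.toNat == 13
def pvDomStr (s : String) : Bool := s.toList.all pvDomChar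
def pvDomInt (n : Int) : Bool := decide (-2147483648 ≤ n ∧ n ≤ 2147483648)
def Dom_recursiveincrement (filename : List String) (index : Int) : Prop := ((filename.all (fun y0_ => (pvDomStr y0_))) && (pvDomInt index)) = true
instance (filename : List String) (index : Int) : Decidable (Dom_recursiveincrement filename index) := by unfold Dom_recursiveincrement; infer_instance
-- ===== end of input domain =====

-- B is a pure scan-and-rebuild re-implementation; equivalence is about the RETURN value only:
-- A mutates `filename` in place, B does not.
-- Cells that Python sets to the ints 10 / 0 / n+1 are stored as their str() images (PySem.Int.toStr),
-- which is exact for the returned "".join(map(str, filename)).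

-- ===== PORT A =====
def recursiveincrement (filename : List String) (index : Int) : String :=
  if h : 0 ≤ index ∧ PySem.Str.strIsdigit (PySem.List.pyGetD filename index "") = true then
    if (PySem.Int.ofStr? (PySem.List.pyGetD filename index "")).getD 0 = 9 then
      let v : Int :=
        if index = 0 ∨ ¬ PySem.Str.strIsdigit (PySem.List.pyGetD filename (index - 1) "") = true
        then 10 else 0
      recursiveincrement (PySem.List.pySetD filename index (PySem.Int.toStr v)) (index - 1)
    else
      PySem.Str.join ""
        (PySem.List.pySetD filename index
          (PySem.Int.toStr ((PySem.Int.ofStr? (PySem.List.pyGetD filename index "")).getD 0 + 1)))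
  else
    PySem.Str.join "" filename
termination_by (index + 1).toNat
decreasing_by omega

-- ===== PORT B =====
-- the `while k >= 0 and filename[k].isdigit() and int(filename[k]) == 9: k -= 1` scan of Source B
def findNineRun (filename : List String) (k : Int) : Int :=
  if h : 0 ≤ k ∧ PySem.Str.strIsdigit (PySem.List.pyGetD filename k "") = true ∧
         (PySem.Int.ofStr? (PySem.List.pyGetD filename k "")).getD 0 = 9 then
    findNineRun filename (k - 1)
  else k
termination_by (k + 1).toNat
decreasing_by omega

def recursiveincrement_alt (filename : List String) (index : Int) : String :=
  if index < 0 ∨ ¬ PySem.Str.strIsdigit (PySem.List.pyGetD filename index "") = true then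
    PySem.Str.join "" filename
  else
    let k := findNineRun filename index
    let r := k + 1
    let parts : List String :=
      if index < r then
        PySem.List.slice filename none (some index) ++
          [PySem.Int.toStr ((PySem.Int.ofStr? (PySem.List.pyGetD filename index "")).getD 0 + 1)] ++
          PySem.List.slice filename (some (index + 1)) none
      else if 0 ≤ k ∧ PySem.Str.strIsdigit (PySem.List.pyGetD filename k "") = true then
        PySem.List.slice filename none (some k) ++
          [PySem.Int.toStr ((PySem.Int.ofStr? (PySem.List.pyGetD filename k "")).getD 0 + 1)] ++
          List.replicate (index - r + 1).toNat "0" ++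
          PySem.List.slice filename (some (index + 1)) none
      else
        PySem.List.slice filename none (some r) ++
          ["10"] ++ List.replicate (index - r).toNat "0" ++
          PySem.List.slice filename (some (index + 1)) none
    PySem.Str.join "" parts

-- ===== PRECONDITION & SPEC =====
-- Pre_ excludes exactly index ≥ len(filename), on which A's very first filename[index] raises IndexError
-- (B raises there too).
def Pre_recursiveincrement (filename : List String) (index : Int) : Prop :=
  index < (filename.length : Int)
instance (filename : List String) (index : Int) : Decidable (Pre_recursiveincrement filename index) := by
  unfold Pre_recursiveincrement; infer_instance

def pvWitness_recursiveincrement : List String × Int := (["a", "1", "9"], 2)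

def Spec_recursiveincrement (filename : List String) (index : Int) (out : String) : Prop := out = recursiveincrement_alt filename index
instance (filename : List String) (index : Int) (out : String) : Decidable (Spec_recursiveincrement filename index out) := by unfold Spec_recursiveincrement; infer_instance

-- ===== CLAIM (what is proved, stated in full; the proofs are below) =====
def Claim_equal_recursiveincrement : Prop := ∀ (filename : List String) (index : Int), Dom_recursiveincrement filename index → Pre_recursiveincrement filename index → Spec_recursiveincrement filename index (recursiveincrement filename index)

-- ===== LEMMAS AND PROOFS =====

theorem run_le (l : List String) (k : Int) : findNineRun l k ≤ k := by
  induction k using findNineRun.induct l with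
  | case1 k h ih => rw [findNineRun, dif_pos h]; omega
  | case2 k h => rw [findNineRun, dif_neg h]

theorem cell_set_lt (l : List String) (n : Nat) (v : String) (j : Int)
    (h0 : 0 ≤ j) (hj : j < (n : Int)) (hn : n < l.length) :
    PySem.List.pyGetD (l.set n v) j "" = PySem.List.pyGetD l j "" := by
  have hl : j < (l.length : Int) := by omega
  rw [PySem.List.pyGetD_eq_getElem (l.set n v) "" h0 (by simp only [List.length_set]; exact hl),
      PySem.List.pyGetD_eq_getElem l "" h0 hl]
  apply List.getElem_set_ne
  omega

theorem run_set (l : List String) (n : Nat) (v : String) (k : Int)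
    (hk : k < (n : Int)) (hn : n < l.length) :
    findNineRun (l.set n v) k = findNineRun l k := by
  have key : ∀ (M : Nat) (k : Int), (k+1).toNat ≤ M → k < (n : Int) →
      findNineRun (l.set n v) k = findNineRun l k := by
    intro M
    induction M with
    | zero =>
      intro k hM _
      conv_lhs => rw [findNineRun]
      conv_rhs => rw [findNineRun]
      rw [dif_neg (by omega), dif_neg (by omega)]
    | succ M ih =>
      intro k hM hk
      by_cases h0 : 0 ≤ k
      · conv_lhs => rw [findNineRun]
        conv_rhs => rw [findNineRun]
        rw [cell_set_lt l n v k h0 hk hn]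
        split
        · exact ih (k-1) (by omega) (by omega)
        · rfl
      · conv_lhs => rw [findNineRun]
        conv_rhs => rw [findNineRun]
        rw [dif_neg (by omega), dif_neg (by omega)]
  exact key (k+1).toNat k (le_refl _) hk

theorem run_stop (l : List String) (k : Int)
    (h : ¬(0 ≤ k ∧ PySem.Str.strIsdigit (PySem.List.pyGetD l k "") = true ∧
          (PySem.Int.ofStr? (PySem.List.pyGetD l k "")).getD 0 = 9)) :
    findNineRun l k = k := by
  rw [findNineRun, dif_neg h]

theorem run_nine (l : List String) (k : Int)
    (h : 0 ≤ k ∧ PySem.Str.strIsdigit (PySem.List.pyGetD l k "") = true ∧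
         (PySem.Int.ofStr? (PySem.List.pyGetD l k "")).getD 0 = 9) :
    findNineRun l k = findNineRun l (k - 1) := by
  conv_lhs => rw [findNineRun]
  rw [dif_pos h]

theorem take_set_of_le (l : List String) (m n : Nat) (v : String) (h : m ≤ n) :
    (l.set n v).take m = l.take m := by
  rw [List.take_set]
  exact List.set_eq_of_length_le (le_trans (List.length_take_le _ _) h)

theorem drop_set_self (l : List String) (n : Nat) (v : String) (h : n < l.length) :
    (l.set n v).drop n = v :: l.drop (n + 1) := by
  rw [List.drop_set, if_neg (by omega), Nat.sub_self, List.drop_eq_getElem_cons h,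
      List.set_cons_zero]


theorem run_ge (l : List String) (k : Int) (h : -1 ≤ k) : -1 ≤ findNineRun l k := by
  induction k using findNineRun.induct l with
  | case1 k hc ih => rw [findNineRun, dif_pos hc]; exact ih (by omega)
  | case2 k hc => rw [findNineRun, dif_neg hc]; omega

theorem alt_neg (l : List String) (i : Int)
    (h : i < 0 ∨ ¬ PySem.Str.strIsdigit (PySem.List.pyGetD l i "") = true) :
    recursiveincrement_alt l i = PySem.Str.join "" l := by
  simp only [recursiveincrement_alt]
  rw [if_pos h]

theorem alt_branch1 (l : List String) (i : Int) (h0 : 0 ≤ i)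
    (hd : PySem.Str.strIsdigit (PySem.List.pyGetD l i "") = true)
    (hk : i < findNineRun l i + 1) :
    recursiveincrement_alt l i =
      PySem.Str.join "" (l.take i.toNat ++
        [PySem.Int.toStr ((PySem.Int.ofStr? (PySem.List.pyGetD l i "")).getD 0 + 1)] ++
        l.drop (i.toNat + 1)) := by
  simp only [recursiveincrement_alt]
  rw [if_neg (by rintro (h | h) <;> first | omega | exact h hd), if_pos hk, PySem.List.slice_to l h0, PySem.List.slice_from l (by omega)]
  have : (i + 1).toNat = i.toNat + 1 := by omega
  rw [this]

theorem alt_branch2 (l : List String) (i k : Int) (h0 : 0 ≤ i)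
    (hd : PySem.Str.strIsdigit (PySem.List.pyGetD l i "") = true)
    (hkdef : findNineRun l i = k) (hr : ¬ i < k + 1)
    (hc : 0 ≤ k ∧ PySem.Str.strIsdigit (PySem.List.pyGetD l k "") = true) :
    recursiveincrement_alt l i =
      PySem.Str.join "" (l.take k.toNat ++
        [PySem.Int.toStr ((PySem.Int.ofStr? (PySem.List.pyGetD l k "")).getD 0 + 1)] ++
        List.replicate (i - k).toNat "0" ++ l.drop (i.toNat + 1)) := by
  simp only [recursiveincrement_alt, hkdef]
  rw [if_neg (by rintro (h | h) <;> first | omega | exact h hd), if_neg hr, if_pos hc, PySem.List.slice_to l hc.1,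
      PySem.List.slice_from l (by omega)]
  have e1 : (i + 1).toNat = i.toNat + 1 := by omega
  have e2 : (i - (k + 1) + 1) = i - k := by ring
  rw [e1, e2]

theorem alt_branch3 (l : List String) (i k : Int) (h0 : 0 ≤ i)
    (hd : PySem.Str.strIsdigit (PySem.List.pyGetD l i "") = true)
    (hk1 : -1 ≤ k) (hkdef : findNineRun l i = k) (hr : ¬ i < k + 1)
    (hc : ¬ (0 ≤ k ∧ PySem.Str.strIsdigit (PySem.List.pyGetD l k "") = true)) :
    recursiveincrement_alt l i =
      PySem.Str.join "" (l.take (k + 1).toNat ++ ["10"] ++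
        List.replicate (i - (k + 1)).toNat "0" ++ l.drop (i.toNat + 1)) := by
  simp only [recursiveincrement_alt, hkdef]
  rw [if_neg (by rintro (h | h) <;> first | omega | exact h hd), if_neg hr, if_neg hc, PySem.List.slice_to l (by omega),
      PySem.List.slice_from l (by omega)]
  have e1 : (i + 1).toNat = i.toNat + 1 := by omega
  rw [e1]

theorem alt_step (l : List String) (i : Int) (h0 : 0 ≤ i) (hlen : i < (l.length : Int))
    (hd : PySem.Str.strIsdigit (PySem.List.pyGetD l i "") = true)
    (h9 : (PySem.Int.ofStr? (PySem.List.pyGetD l i "")).getD 0 = 9) :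
    recursiveincrement_alt
      (PySem.List.pySetD l i (PySem.Int.toStr
        (if i = 0 ∨ ¬ PySem.Str.strIsdigit (PySem.List.pyGetD l (i - 1) "") = true then (10:Int) else 0)))
      (i - 1)
    = recursiveincrement_alt l i := by
  rw [PySem.List.pySetD_of_nonneg l _ h0]
  have hnl : i.toNat < l.length := by omega
  by_cases hi0 : i = 0
  · subst hi0
    rw [if_pos (Or.inl rfl), (by decide : PySem.Int.toStr 10 = "10")]
    have hk : findNineRun l 0 = -1 := by
      rw [run_nine l 0 ⟨h0, hd, h9⟩, run_stop l (0-1) (by intro hh; omega)]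
      norm_num
    rw [alt_neg _ (0-1) (Or.inl (by omega)),
        alt_branch3 l 0 (-1) h0 hd (by omega) hk (by omega) (by intro hh; omega)]
    congr 1
    rw [List.set_eq_take_append_cons_drop, if_pos (by simpa using hnl)]
    norm_num
  · by_cases hdp : PySem.Str.strIsdigit (PySem.List.pyGetD l (i-1) "") = true
    · rw [if_neg (by push Not; exact ⟨hi0, hdp⟩), (by decide : PySem.Int.toStr 0 = "0")]
      have hi1 : 1 ≤ i := by omega
      have hdp' : PySem.Str.strIsdigit (PySem.List.pyGetD (l.set i.toNat "0") (i-1) "") = true := by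
        rw [cell_set_lt l i.toNat "0" (i-1) (by omega) (by omega) hnl]; exact hdp
      have hnv' : (PySem.Int.ofStr? (PySem.List.pyGetD (l.set i.toNat "0") (i-1) "")).getD 0
          = (PySem.Int.ofStr? (PySem.List.pyGetD l (i-1) "")).getD 0 := by
        rw [cell_set_lt l i.toNat "0" (i-1) (by omega) (by omega) hnl]
      have hkR : findNineRun l i = findNineRun l (i-1) := run_nine l i ⟨h0, hd, h9⟩
      have hkL : findNineRun (l.set i.toNat "0") (i-1) = findNineRun l (i-1) :=
        run_set l i.toNat "0" (i-1) (by omega) hnl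
      have hdropL : (l.set i.toNat "0").drop ((i-1).toNat + 1) = "0" :: l.drop (i.toNat + 1) := by
        have : (i-1).toNat + 1 = i.toNat := by omega
        rw [this, drop_set_self l i.toNat "0" hnl]
      by_cases h9p : (PySem.Int.ofStr? (PySem.List.pyGetD l (i-1) "")).getD 0 = 9
      · -- cell i-1 is also a nine
        have hk2 : findNineRun l (i-1) = findNineRun l (i-1-1) := run_nine l (i-1) ⟨by omega, hdp, h9p⟩
        have hkle : findNineRun l (i-1) ≤ i - 2 := by
          rw [hk2]; have := run_le l (i-1-1); omega
        have hkge : -1 ≤ findNineRun l (i-1) := run_ge l (i-1) (by omega)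
        set k := findNineRun l (i-1) with hkdefn
        by_cases hc : 0 ≤ k ∧ PySem.Str.strIsdigit (PySem.List.pyGetD l k "") = true
        · have hcellk : PySem.List.pyGetD (l.set i.toNat "0") k "" = PySem.List.pyGetD l k "" :=
            cell_set_lt l i.toNat "0" k hc.1 (by omega) hnl
          rw [alt_branch2 (l.set i.toNat "0") (i-1) k (by omega) hdp' (hkL.trans hkdefn.symm ▸ hkL) (by omega)
                (by rw [hcellk]; exact hc),
              alt_branch2 l i k h0 hd (hkR.trans rfl) (by omega) hc]
          congr 1
          rw [hcellk, take_set_of_le l k.toNat i.toNat "0" (by omega), hdropL]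
          have : (i - k).toNat = (i - 1 - k).toNat + 1 := by omega
          rw [this, List.replicate_succ']
          simp [List.append_assoc]
        · have hcL : ¬ (0 ≤ k ∧ PySem.Str.strIsdigit (PySem.List.pyGetD (l.set i.toNat "0") k "") = true) := by
            intro hh
            exact hc ⟨hh.1, by rw [← cell_set_lt l i.toNat "0" k hh.1 (by omega) hnl]; exact hh.2⟩
          rw [alt_branch3 (l.set i.toNat "0") (i-1) k (by omega) hdp' (by omega) hkL (by omega) hcL,
              alt_branch3 l i k h0 hd (by omega) hkR (by omega) hc]
          congr 1
          rw [take_set_of_le l (k+1).toNat i.toNat "0" (by omega), hdropL]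
          have : (i - (k + 1)).toNat = (i - 1 - (k + 1)).toNat + 1 := by omega
          rw [this, List.replicate_succ']
          simp [List.append_assoc]
      · -- cell i-1 is a digit but not a nine
        have hkstop : findNineRun l (i-1) = i - 1 :=
          run_stop l (i-1) (by intro hh; exact h9p hh.2.2)
        have hcellk : PySem.List.pyGetD (l.set i.toNat "0") (i-1) "" = PySem.List.pyGetD l (i-1) "" :=
          cell_set_lt l i.toNat "0" (i-1) (by omega) (by omega) hnl
        rw [alt_branch1 (l.set i.toNat "0") (i-1) (by omega) hdp' (by rw [hkL, hkstop]; omega),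
            alt_branch2 l i (i-1) h0 hd (hkR.trans hkstop) (by omega) ⟨by omega, hdp⟩]
        congr 1
        rw [hcellk, take_set_of_le l (i-1).toNat i.toNat "0" (by omega), hdropL]
        have : (i - (i-1)).toNat = 1 := by omega
        rw [this]
        simp [List.append_assoc]
    · -- cell i-1 is not a digit (and i ≠ 0)
      rw [if_pos (Or.inr hdp), (by decide : PySem.Int.toStr 10 = "10")]
      have hkstop : findNineRun l i = i - 1 := by
        rw [run_nine l i ⟨h0, hd, h9⟩, run_stop l (i-1) (by intro hh; exact hdp hh.2.1)]
      rw [alt_neg _ (i-1) (Or.inr (by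
            rw [cell_set_lt l i.toNat "10" (i-1) (by omega) (by omega) hnl]; exact hdp)),
          alt_branch3 l i (i-1) h0 hd (by omega) hkstop (by omega) (by intro hh; exact hdp hh.2)]
      congr 1
      rw [List.set_eq_take_append_cons_drop, if_pos hnl]
      have e1 : (i - 1 + 1).toNat = i.toNat := by omega
      have e2 : (i - (i - 1 + 1)).toNat = 0 := by omega
      rw [e1, e2]
      simp

theorem main_equiv : ∀ (l : List String) (i : Int), i < (l.length : Int) →
    recursiveincrement l i = recursiveincrement_alt l i := by
  have key : ∀ (M : Nat) (l : List String) (i : Int), (i + 1).toNat ≤ M →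
      i < (l.length : Int) → recursiveincrement l i = recursiveincrement_alt l i := by
    intro M
    induction M with
    | zero =>
      intro l i hM hlen
      rw [recursiveincrement, dif_neg (by omega), alt_neg l i (Or.inl (by omega))]
    | succ M ih =>
      intro l i hM hlen
      rw [recursiveincrement]
      by_cases h : 0 ≤ i ∧ PySem.Str.strIsdigit (PySem.List.pyGetD l i "") = true
      · rw [dif_pos h]
        by_cases h9 : (PySem.Int.ofStr? (PySem.List.pyGetD l i "")).getD 0 = 9
        · rw [if_pos h9]
          rw [ih (PySem.List.pySetD l i _) (i - 1) (by omega)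
                (by rw [PySem.List.pySetD_of_nonneg l _ h.1]; simp only [List.length_set]; omega)]
          exact alt_step l i h.1 hlen h.2 h9
        · rw [if_neg h9, alt_branch1 l i h.1 h.2 (by rw [run_stop l i (by intro hh; exact h9 hh.2.2)]; omega)]
          congr 1
          rw [PySem.List.pySetD_of_nonneg l _ h.1, List.set_eq_take_append_cons_drop,
              if_pos (by omega)]
          simp
      · rw [dif_neg h, alt_neg l i (by
          rcases not_and_or.mp h with h' | h'
          · exact Or.inl (by omega)
          · exact Or.inr h')]
  intro l i hlen
  exact key (i + 1).toNat l i (le_refl _) hlen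

-- ===== VERDICT (by name: the statement is the Claim_ definition above) =====
theorem recursiveincrement_spec : Claim_equal_recursiveincrement := by
  intro l i _ hpre
  exact main_equiv l i hpre
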